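-- pv_equiv track=rewrite | github.com/JossGrimwood/LetterBoxedNYT-solver | solver.py | find_combos
-- ===== SOURCE A (Python) =====
-- from collections import defaultdict, Counter
--
-- def find_combos(word_list, letters):
--     # Create a dictionary where keys are first letters and values are lists of words
--     first_letter_dict = defaultdict(list)
--     for w in word_list:
--         if w:
--             first_letter_dict[w[0]].append(w)
--
--     results = []
--     letters_set = set(letters)
--
--     def search(sentence, depth, used_letters):
--         if len(used_letters) == len(letters_set):
--             results.append(sentence)
--             return
--
--         if depth <= 0:
--             return
--
--         last_letter = sentence[-1]
--         if last_letter in first_letter_dict: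
--             for w in first_letter_dict[last_letter]:
--                 new_used_letters = used_letters | set(w)
--                 if len(new_used_letters) <= len(letters_set):
--                     search(sentence + " " + w, depth - 1, new_used_letters)
--
--     # Initialize search with each word in the word_list
--     for w in word_list:
--         search(w, max_itterations - 1, set(w))
--
--     return results
--
-- max_itterations = 4
-- ===== SOURCE B (Python) =====
-- max_itterations = 4
--
-- def find_combos(word_list, letters):
--     # Iterative DFS: explicit stack of (sentence, depth, used) frames per start word.
--     target = len(set(letters))
--     children = {}
--     for w in word_list:
--         if w:
--             children.setdefault(w[0], []).append(w)
--     results = []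
--     for start in word_list:
--         stack = [(start, max_itterations - 1, set(start))]
--         while stack:
--             sentence, depth, used = stack.pop()
--             if len(used) == target:
--                 results.append(sentence)
--                 continue
--             if depth <= 0:
--                 continue
--             kids = children.get(sentence[-1], [])
--             if kids:
--                 for w in reversed(kids):
--                     nu = used | set(w)
--                     if len(nu) <= target:
--                         stack.append((sentence + " " + w, depth - 1, nu))
--     return results
-- ===== Notes on version B (the rewrite author's own statement) =====
-- stated objective: alternative
-- what changed: The nested recursive search closure is replaced by an iterative depth-first traversal with an explicit stack of (sentence, depth, used_letters) frames per start word, pushing qualifying children in reverse so they pop in the recursion's preorder; the recursion disappears entirely.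
import Mathlib
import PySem

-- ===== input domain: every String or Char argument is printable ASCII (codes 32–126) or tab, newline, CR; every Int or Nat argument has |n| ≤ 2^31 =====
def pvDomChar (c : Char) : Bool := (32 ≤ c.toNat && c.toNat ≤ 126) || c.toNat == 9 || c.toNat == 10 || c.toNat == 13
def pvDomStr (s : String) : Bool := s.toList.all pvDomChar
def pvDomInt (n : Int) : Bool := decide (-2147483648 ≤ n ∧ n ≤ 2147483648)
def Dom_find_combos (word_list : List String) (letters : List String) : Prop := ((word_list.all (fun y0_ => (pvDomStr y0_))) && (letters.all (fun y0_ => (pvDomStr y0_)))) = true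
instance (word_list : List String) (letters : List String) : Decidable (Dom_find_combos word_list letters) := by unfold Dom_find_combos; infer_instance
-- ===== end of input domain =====

-- B replaces the recursive search closure by an iterative DFS over an explicit stack of (sentence, depth, used) frames; same results in the same order.

-- module-level constant shared by both sources
def max_itterations : Int := 4

-- ===== PORT A =====
-- loop body of: for w in word_list: if w: first_letter_dict[w[0]].append(w)   (defaultdict(list))
def stepA (d : PySem.Dict Char (List String)) (w : String) : PySem.Dict Char (List String) :=
  match w.toList with
  | [] => d
  | c :: _ => d.modify c [] (· ++ [w])

-- the recursive 'search'; sentences carried as List Char (Python str concatenation, exact)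
def searchA (fld : PySem.Dict Char (List String)) (nL : Nat) (depth : Nat)
    (sentence : List Char) (used : PySem.Set Char) : List (List Char) :=
  if used.length = nL then [sentence]
  else match depth with
  | 0 => []
  | d + 1 =>
    match PySem.List.pyGet? sentence (-1) with
    | none => []   -- Python raises IndexError on sentence[-1] here; such inputs are outside Pre_
    | some c =>
      match fld.get? c with
      | none => []
      | some ws =>
        ws.flatMap (fun w =>
          let nu := PySem.Set.union used (PySem.Set.ofList w.toList)
          if nu.length ≤ nL then searchA fld nL d (sentence ++ ' ' :: w.toList) nu else [])
termination_by depth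

def find_combos (word_list : List String) (letters : List String) : List String :=
  let fld := word_list.foldl stepA PySem.Dict.empty
  let nL := (PySem.Set.ofList letters).length
  (word_list.foldl (fun acc w =>
      acc ++ searchA fld nL (max_itterations - 1).toNat w.toList (PySem.Set.ofList w.toList)) []).map String.ofList

-- ===== PORT B =====
-- loop body of: for w in word_list: if w: children.setdefault(w[0], []).append(w)
def stepB (d : PySem.Dict Char (List String)) (w : String) : PySem.Dict Char (List String) :=
  match w.toList with
  | [] => d
  | c :: _ =>
    let d' := d.setdefault c []
    d'.insert c (d'.getD c [] ++ [w])

-- the while loop over the explicit stack; the extra fuel argument is a totality guard only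
-- (find_combos_alt passes fuel ≥ the loop's iteration count, proved in runB_eq_search)
def runB (fld : PySem.Dict Char (List String)) (nL : Nat) :
    Nat → List (List Char × Nat × PySem.Set Char) → List (List Char) → List (List Char)
  | 0, _, res => res
  | _ + 1, [], res => res
  | fuel + 1, (sentence, depth, used) :: rest, res =>
    if used.length = nL then runB fld nL fuel rest (res ++ [sentence])
    else match depth with
    | 0 => runB fld nL fuel rest res
    | d + 1 =>
      match PySem.List.pyGet? sentence (-1) with
      | none => runB fld nL fuel rest res  -- Python raises IndexError here; such inputs are outside Pre_
      | some c =>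
        -- kids = children.get(c): None and [] are both falsy, so reading it as get(c, []) is exact
        if (fld.getD c []).isEmpty then runB fld nL fuel rest res
        else
          runB fld nL fuel
            ((fld.getD c []).reverse.foldl (fun st w =>
              let nu := PySem.Set.union used (PySem.Set.ofList w.toList)
              if nu.length ≤ nL then (sentence ++ ' ' :: w.toList, d, nu) :: st else st) rest) res

def find_combos_alt (word_list : List String) (letters : List String) : List String :=
  let target := (PySem.Set.ofList letters).length
  let fld := word_list.foldl stepB PySem.Dict.empty
  let fuel := (word_list.length + 1) ^ (max_itterations - 1).toNat
  (word_list.foldl (fun res start =>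
      runB fld target fuel
        [(start.toList, (max_itterations - 1).toNat, PySem.Set.ofList start.toList)] res) []).map String.ofList

-- ===== PRECONDITION & SPEC =====
-- Pre_ excludes exactly the inputs where Python A raises IndexError: an empty word in word_list
-- with a nonempty letters set makes search('', …) evaluate sentence[-1] on the empty string.
def Pre_find_combos (word_list : List String) (letters : List String) : Prop :=
  "" ∉ word_list ∨ letters = []
instance (word_list : List String) (letters : List String) : Decidable (Pre_find_combos word_list letters) := by unfold Pre_find_combos; infer_instance

def pvWitness_find_combos : List String × List String := (["ab", "ba"], ["a", "b"])

def Spec_find_combos (word_list : List String) (letters : List String) (out : List String) : Prop := out = find_combos_alt word_list letters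
instance (word_list : List String) (letters : List String) (out : List String) : Decidable (Spec_find_combos word_list letters out) := by unfold Spec_find_combos; infer_instance

-- ===== CLAIM (what is proved, stated in full; the proofs are below) =====
def Claim_equal_find_combos : Prop := ∀ (word_list : List String) (letters : List String), Dom_find_combos word_list letters → Pre_find_combos word_list letters → Spec_find_combos word_list letters (find_combos word_list letters)

-- ===== LEMMAS AND PROOFS =====

-- bound on the children-list lengths of the built dictionary (fuel sufficiency)
theorem stepB_getD_len (d : PySem.Dict Char (List String)) (w : String) (c : Char) :
    ((stepB d w).getD c []).length ≤ (d.getD c []).length + 1 := by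
  cases hw : w.toList with
  | nil => simp [stepB, hw]
  | cons c' t =>
    simp only [stepB, hw]
    by_cases hc : c = c'
    · subst hc
      by_cases h : d.contains c
      · rw [PySem.Dict.setdefault_of_contains _ _ h]
        simp [PySem.Dict.getD_insert_self]
      · rw [PySem.Dict.setdefault_of_not_contains _ _ (by simpa using h)]
        simp [PySem.Dict.getD_insert_self]
    · rw [show ∀ (d' : PySem.Dict Char (List String)),
          ((d'.insert c' (d'.getD c' [] ++ [w])).getD c []) = d'.getD c [] from
          fun d' => PySem.Dict.getD_insert_of_ne _ _ _ hc]
      rw [PySem.Dict.getD_eq_get?_getD, PySem.Dict.get?_setdefault_of_ne _ _ hc,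
        ← PySem.Dict.getD_eq_get?_getD]
      omega

theorem buildB_foldl_len (ws : List String) : ∀ (d : PySem.Dict Char (List String)) (c : Char),
    ((ws.foldl stepB d).getD c []).length ≤ (d.getD c []).length + ws.length := by
  induction ws with
  | nil => intro d c; simp
  | cons w t ih =>
    intro d c
    simp only [List.foldl_cons, List.length_cons]
    have h1 := stepB_getD_len d w c
    have h2 := ih (stepB d w) c
    omega

theorem buildB_getD_len_le (word_list : List String) (c : Char) :
    (((word_list.foldl stepB PySem.Dict.empty)).getD c []).length ≤ word_list.length := by
  have := buildB_foldl_len word_list PySem.Dict.empty c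
  simpa [PySem.Dict.getD_empty] using this

-- the two dict-building loop bodies coincide (defaultdict append vs setdefault append)
theorem stepA_eq_stepB : stepA = stepB := by
  funext d w
  cases hw : w.toList with
  | nil => simp [stepA, stepB, hw]
  | cons c t =>
    simp only [stepA, stepB, hw, PySem.Dict.modify]
    by_cases h : d.contains c
    · rw [PySem.Dict.setdefault_of_contains _ _ h]
    · rw [PySem.Dict.setdefault_of_not_contains _ _ (by simpa using h)]
      simp [PySem.Dict.getD_insert_self, PySem.Dict.insert_insert_self,
        PySem.Dict.getD_of_not_contains _ _ (by simpa using h)]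

-- folding the reversed children onto the stack = the qualifying children (forward) in front
theorem push_eq_filter (nL d : Nat) (sentence : List Char) (used : PySem.Set Char)
    (l : List String) : ∀ (st : List (List Char × Nat × PySem.Set Char)),
    l.reverse.foldl (fun st w =>
        let nu := PySem.Set.union used (PySem.Set.ofList w.toList)
        if nu.length ≤ nL then (sentence ++ ' ' :: w.toList, d, nu) :: st else st) st
      = ((l.filter (fun w => (PySem.Set.union used (PySem.Set.ofList w.toList)).length ≤ nL)).map
          (fun w => (sentence ++ ' ' :: w.toList, d, PySem.Set.union used (PySem.Set.ofList w.toList)))) ++ st := by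
  induction l with
  | nil => intro st; simp
  | cons w t ih =>
    intro st
    simp only [List.reverse_cons, List.foldl_append, List.foldl_cons, List.foldl_nil, ih st]
    by_cases h : (PySem.Set.union used (PySem.Set.ofList w.toList)).length ≤ nL
    · simp [h]
    · simp [h]

-- flatMap over the filtered-and-mapped children = the guarded flatMap of the recursion
theorem flatMap_filter_map {α β γ : Type} (p : α → Bool) (g : α → β) (h : β → List γ)
    (l : List α) :
    ((l.filter p).map g).flatMap h = l.flatMap (fun w => if p w then h (g w) else []) := by
  induction l with
  | nil => rfl
  | cons a t ih =>
    by_cases hp : p a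
    · simp [hp, ih]
    · simp [hp, ih]

-- branch-evaluation lemmas for the recursive search
theorem searchA_done (fld : PySem.Dict Char (List String)) (nL depth : Nat)
    (sentence : List Char) (used : PySem.Set Char) (h : used.length = nL) :
    searchA fld nL depth sentence used = [sentence] := by
  rw [searchA.eq_def]; simp [h]

theorem searchA_zero (fld : PySem.Dict Char (List String)) (nL : Nat)
    (sentence : List Char) (used : PySem.Set Char) (h : ¬ used.length = nL) :
    searchA fld nL 0 sentence used = [] := by
  rw [searchA.eq_def]; simp [h]

theorem searchA_none (fld : PySem.Dict Char (List String)) (nL d : Nat)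
    (sentence : List Char) (used : PySem.Set Char) (h : ¬ used.length = nL)
    (hg : PySem.List.pyGet? sentence (-1) = none) :
    searchA fld nL (d + 1) sentence used = [] := by
  rw [searchA.eq_def]; simp [h, hg]

theorem searchA_succ_eval (fld : PySem.Dict Char (List String)) (nL d : Nat)
    (sentence : List Char) (used : PySem.Set Char) (c : Char) (h : ¬ used.length = nL)
    (hg : PySem.List.pyGet? sentence (-1) = some c) :
    searchA fld nL (d + 1) sentence used
      = (fld.getD c []).flatMap (fun w =>
          if (PySem.Set.union used (PySem.Set.ofList w.toList)).length ≤ nL then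
            searchA fld nL d (sentence ++ ' ' :: w.toList) (PySem.Set.union used (PySem.Set.ofList w.toList))
          else []) := by
  rw [searchA.eq_def]
  simp only [h, if_false, hg]
  cases hq : fld.get? c with
  | none => simp [PySem.Dict.getD_eq_get?_getD, hq]
  | some ws => simp [PySem.Dict.getD_eq_get?_getD, hq]

-- a frame's potential bounds the loop iterations its subtree needs
def potB (C : Nat) (f : List Char × Nat × PySem.Set Char) : Nat := (C + 1) ^ f.2.1

-- pushing the qualifying children adds at most l.length * (C+1)^d to the measure
theorem sum_pot_push (C nL d : Nat) (sentence : List Char) (used : PySem.Set Char)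
    (l : List String) : ∀ (st : List (List Char × Nat × PySem.Set Char)),
    ((l.foldl (fun st w =>
        let nu := PySem.Set.union used (PySem.Set.ofList w.toList)
        if nu.length ≤ nL then (sentence ++ ' ' :: w.toList, d, nu) :: st else st) st).map (potB C)).sum
      ≤ l.length * (C + 1) ^ d + (st.map (potB C)).sum := by
  induction l with
  | nil => intro st; simp
  | cons w t ih =>
    intro st
    simp only [List.foldl_cons, List.length_cons]
    refine le_trans (ih _) ?_
    split
    · simp only [List.map_cons, List.sum_cons, potB]
      ring_nf
      omega
    · ring_nf
      omega

-- with enough fuel, the stack run produces, in order, exactly the search results of its frames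
theorem runB_eq_search (fld : PySem.Dict Char (List String)) (nL C : Nat)
    (hC : ∀ c, ((fld.getD c []).length ≤ C)) :
    ∀ (fuel : Nat) (stack : List (List Char × Nat × PySem.Set Char)) (res : List (List Char)),
    (stack.map (potB C)).sum ≤ fuel →
    runB fld nL fuel stack res = res ++ stack.flatMap (fun f => searchA fld nL f.2.1 f.1 f.2.2) := by
  intro fuel
  induction fuel with
  | zero =>
    intro stack res hle
    cases stack with
    | nil => simp [runB]
    | cons f rest =>
      exfalso
      have h1 : 1 ≤ potB C f := Nat.one_le_pow _ _ (by omega)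
      simp only [List.map_cons, List.sum_cons] at hle
      omega
  | succ fuel ih =>
    intro stack res hle
    cases stack with
    | nil => simp [runB]
    | cons f rest =>
      obtain ⟨sentence, depth, used⟩ := f
      simp only [List.map_cons, List.sum_cons, potB] at hle
      have hrest : (rest.map (potB C)).sum ≤ fuel := by
        have h1 : (1:Nat) ≤ (C + 1) ^ depth := Nat.one_le_pow _ _ (by omega)
        omega
      by_cases hdone : used.length = nL
      · simp only [runB]
        rw [if_pos hdone, ih rest _ hrest]
        simp [searchA_done _ _ _ _ _ hdone]
      · simp only [runB]
        rw [if_neg hdone]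
        cases depth with
        | zero =>
          dsimp only
          rw [ih rest _ hrest]
          simp [searchA_zero _ _ _ _ hdone]
        | succ d =>
          dsimp only
          cases hg : PySem.List.pyGet? sentence (-1) with
          | none =>
            dsimp only
            rw [ih rest _ hrest]
            simp [searchA_none _ _ _ _ _ hdone hg]
          | some c =>
            dsimp only
            by_cases hk : (fld.getD c []).isEmpty
            · rw [if_pos hk, ih rest _ hrest]
              have hknil : fld.getD c [] = [] := by simpa [List.isEmpty_iff] using hk
              simp [searchA_succ_eval _ _ _ _ _ _ hdone hg, hknil]
            · rw [if_neg hk]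
              have hpushed :
                  (((fld.getD c []).reverse.foldl (fun st w =>
                      if (PySem.Set.union used (PySem.Set.ofList w.toList)).length ≤ nL then
                        (sentence ++ ' ' :: w.toList, d, PySem.Set.union used (PySem.Set.ofList w.toList)) :: st
                      else st) rest).map (potB C)).sum ≤ fuel := by
                have hp := sum_pot_push C nL d sentence used (fld.getD c []).reverse rest
                dsimp only at hp
                have hlen : (fld.getD c []).length ≤ C := hC c
                have h1 : (0:Nat) < (C + 1) ^ d := by positivity
                have hpow : (fld.getD c []).length * (C + 1) ^ d < (C + 1) ^ (d + 1) := by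
                  calc (fld.getD c []).length * (C + 1) ^ d ≤ C * (C + 1) ^ d :=
                        Nat.mul_le_mul_right _ hlen
                    _ < (C + 1) * (C + 1) ^ d := (Nat.mul_lt_mul_right h1).mpr (Nat.lt_succ_self C)
                    _ = (C + 1) ^ (d + 1) := by ring
                simp only [List.length_reverse] at hp
                omega
              rw [ih _ _ hpushed, push_eq_filter]
              simp only [List.flatMap_cons, List.flatMap_append, flatMap_filter_map]
              rw [searchA_succ_eval _ _ _ _ _ _ hdone hg]
              simp

-- ===== VERDICT (by name: the statement is the Claim_ definition above) =====
theorem find_combos_spec : Claim_equal_find_combos := by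
  intro word_list letters _ _
  unfold Spec_find_combos find_combos find_combos_alt
  rw [stepA_eq_stepB]
  dsimp only
  congr 1
  apply List.foldl_ext
  intro acc b _
  rw [runB_eq_search _ _ word_list.length (fun c => buildB_getD_len_le word_list c) _ _ _
    (by simp [potB])]
  simp
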